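-- pv_equiv track=rewrite | github.com/kevincg146/Tarea-de-Proga | Taller_Tarea2.py | cd_util
-- ===== SOURCE A (Python) =====
-- def cd_util(n, b):
--     if(n<10):
--         if(n<b):
--             return 1
--         else:
--             return 0
--     else:
--         if n%10<b:
--             return cd(n)
--             return 1 + cd_util(n//10, b)
--         else:
--             return 0
--
-- def cd(n):
--     if(n<10):
--         return 1
--     else:
--         return 1+cd(n//10)
-- ===== SOURCE B (Python) =====
-- def cd_util(n, b):
--     if n >= 10:
--         if n % 10 >= b:
--             return 0
--         p, c = 10, 1
--         while p <= n:
--             p *= 10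
--             c += 1
--         return c
--     return 1 if n < b else 0
-- ===== Notes on version B (the rewrite author's own statement) =====
-- stated objective: alternative
-- what changed: Replaces the recursive divide-by-10 digit-count helper cd with an inlined loop that grows a power of 10 until it exceeds n, counting multiplications instead of divisions.
import Mathlib
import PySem

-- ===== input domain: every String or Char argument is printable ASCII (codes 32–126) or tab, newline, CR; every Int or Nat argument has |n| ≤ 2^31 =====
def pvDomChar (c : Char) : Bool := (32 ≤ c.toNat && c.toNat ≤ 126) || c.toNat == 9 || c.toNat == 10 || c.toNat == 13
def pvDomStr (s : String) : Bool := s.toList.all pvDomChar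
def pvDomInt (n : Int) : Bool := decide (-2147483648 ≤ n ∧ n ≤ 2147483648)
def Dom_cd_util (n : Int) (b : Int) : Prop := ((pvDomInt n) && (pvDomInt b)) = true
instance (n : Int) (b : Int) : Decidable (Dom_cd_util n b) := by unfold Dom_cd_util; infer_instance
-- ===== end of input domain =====

-- B replaces A's recursive divide-by-10 digit-count helper with an inlined loop growing a power of 10 past n (alternative decomposition, same cost).


-- ===== PORT A =====
-- helper cd: recursive digit count
def cd (n : Int) : Int :=
  if n < 10 then 1
  else 1 + cd (PySem.Int.floordiv n 10)
termination_by n.toNat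
decreasing_by
  rw [PySem.Int.floordiv_eq_ediv_of_pos (show (0:Int) < 10 by norm_num)]; omega

def cd_util (n : Int) (b : Int) : Int :=
  if n < 10 then
    if n < b then 1 else 0
  else
    if PySem.Int.mod n 10 < b then cd n
    else 0

-- ===== PORT B =====
-- Source B's while-loop: p is the growing power of 10, c counts multiplications; hp is the
-- invariant 0 < p carried for termination (p strictly grows towards n).
def powLoop (n p c : Int) (hp : 0 < p) : Int :=
  if p ≤ n then powLoop n (p * 10) (c + 1) (by omega)
  else c
termination_by (n + 1 - p).toNat
decreasing_by omega

def cd_util_alt (n : Int) (b : Int) : Int :=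
  if 10 ≤ n then
    if b ≤ PySem.Int.mod n 10 then 0
    else powLoop n 10 1 (by norm_num)
  else
    if n < b then 1 else 0

-- ===== PRECONDITION & SPEC =====
def Spec_cd_util (n : Int) (b : Int) (out : Int) : Prop := out = cd_util_alt n b
instance (n : Int) (b : Int) (out : Int) : Decidable (Spec_cd_util n b out) := by unfold Spec_cd_util; infer_instance

-- ===== CLAIM =====
def Claim_equal_cd_util : Prop := ∀ (n : Int) (b : Int), Dom_cd_util n b → Spec_cd_util n b (cd_util n b)

-- ===== LEMMAS AND PROOFS =====
theorem cd_small {n : Int} (h : n < 10) : cd n = 1 := by rw [cd, if_pos h]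

theorem powLoop_eq (n p c : Int) (hp : 0 < p) (hpn : p ≤ n) :
    powLoop n p c hp = c + cd (n / p) := by
  by_cases h : p * 10 ≤ n
  · rw [powLoop.eq_def, if_pos hpn]
    have ih := powLoop_eq n (p * 10) (c + 1) (by omega) h
    rw [ih]
    have h10 : (10 : Int) ≤ n / p := by
      rw [Int.le_ediv_iff_mul_le hp]; linarith [h]
    have hsplit : n / (p * 10) = n / p / 10 :=
      (Int.ediv_ediv_of_nonneg (by omega)).symm
    have hcd : cd (n / p) = 1 + cd (n / p / 10) := by
      rw [cd, if_neg (by omega)]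
      rw [PySem.Int.floordiv_eq_ediv_of_pos (by omega)]
    rw [hsplit, hcd]
    ring
  · rw [powLoop.eq_def, if_pos hpn, powLoop.eq_def, if_neg h]
    have h1 : 1 ≤ n / p := by rw [Int.le_ediv_iff_mul_le hp]; omega
    have h2 : n / p < 10 := by
      have := Int.ediv_lt_iff_lt_mul (a := n) (b := (10:Int)) hp
      rw [this]; omega
    rw [cd_small h2]
termination_by (n + 1 - p).toNat
decreasing_by omega

-- ===== VERDICT =====
theorem cd_util_spec : Claim_equal_cd_util := by
  intro n b _
  unfold Spec_cd_util cd_util cd_util_alt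
  by_cases h10 : n < 10
  · rw [if_pos h10, if_neg (show ¬ (10:Int) ≤ n by omega)]
  · rw [if_neg h10, if_pos (show (10:Int) ≤ n by omega)]
    by_cases hm : PySem.Int.mod n 10 < b
    · rw [if_pos hm, if_neg (show ¬ b ≤ PySem.Int.mod n 10 by omega)]
      rw [powLoop_eq n 10 1 (by norm_num) (by omega)]
      have hfd : PySem.Int.floordiv n 10 = n / 10 := PySem.Int.floordiv_eq_ediv_of_pos (by omega)
      rw [cd, if_neg h10, hfd]
    · rw [if_neg hm, if_pos (show b ≤ PySem.Int.mod n 10 by omega)]
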